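-- pv_equiv track=rewrite | github.com/AlxisHenry/epitech | T-AIA-911-STG_1/services/nlp-service/app/services/evaluateur.py | tags_to_entities
-- ===== SOURCE A (Python) =====
-- from typing import Dict, List
--
-- def tags_to_entities(tokens: List[str], tags: List[str], label: str) -> List[str]:
--     """
--     Reconstruit toutes les entités d'un label (DEP/ARR) à partir des tags BIO.
--     """
--     entities: List[str] = []
--     current: List[str] = []
--     in_ent = False
--
--     for t, tag in zip(tokens, tags):
--         if tag == f"B-{label}":
--             if current:
--                 entities.append(" ".join(current))
--             current = [t]
--             in_ent = True
--         elif tag == f"I-{label}" and in_ent: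
--             current.append(t)
--         else:
--             if current:
--                 entities.append(" ".join(current))
--             current = []
--             in_ent = False
--
--     if current:
--         entities.append(" ".join(current))
--
--     return entities
-- ===== SOURCE B (Python) =====
-- def tags_to_entities(tokens, tags, label):
--     b_tag = "B-" + label
--     i_tag = "I-" + label
--     n = min(len(tokens), len(tags))
--     entities = []
--     i = 0
--     while i < n:
--         if tags[i] == b_tag:
--             run = [tokens[i]]
--             j = i + 1
--             while j < n and tags[j] == i_tag:
--                 run.append(tokens[j])
--                 j += 1
--             entities.append(" ".join(run))
--             i = j
--         else:
--             i += 1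
--     return entities
-- ===== Notes on version B (the rewrite author's own statement) =====
-- stated objective: alternative
-- what changed: Replaces the flag-driven state machine (entities/current/in_ent mutated on every token) with an index-based outer loop that only reacts to B- tags and an inner while loop that consumes the following run of I- tags, emitting each entity at once; the B-/I- tag strings are built once instead of being re-formatted per token.
import Mathlib
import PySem

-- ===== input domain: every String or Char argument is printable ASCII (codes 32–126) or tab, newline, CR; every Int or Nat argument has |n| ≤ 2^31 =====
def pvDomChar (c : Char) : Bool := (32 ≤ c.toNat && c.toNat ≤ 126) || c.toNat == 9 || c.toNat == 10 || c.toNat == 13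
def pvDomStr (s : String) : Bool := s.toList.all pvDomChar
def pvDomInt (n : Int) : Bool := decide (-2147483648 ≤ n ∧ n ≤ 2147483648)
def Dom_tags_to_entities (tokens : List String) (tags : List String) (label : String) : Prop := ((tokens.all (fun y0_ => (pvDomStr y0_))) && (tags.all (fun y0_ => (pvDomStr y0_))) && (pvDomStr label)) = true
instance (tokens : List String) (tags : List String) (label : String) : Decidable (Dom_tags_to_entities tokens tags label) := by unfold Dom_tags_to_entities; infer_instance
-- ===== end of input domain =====

-- B replaces A's flag-driven state machine with an outer start-tag scan plus an
-- inner while loop consuming each run of I- tags (alternative decomposition, same cost).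

-- ===== PORT A =====
-- "if current: entities.append(' '.join(current))" — the flush step A performs in three places
def finA (st : List String × List String × Bool) : List String :=
  if st.2.1.isEmpty then st.1 else st.1 ++ [PySem.Str.join " " st.2.1]

-- the body of A's for-loop over zip(tokens, tags); state = (entities, current, in_ent)
def stepA (blab ilab : String) (st : List String × List String × Bool)
    (p : String × String) : List String × List String × Bool :=
  if p.2 = blab then
    (finA st, [p.1], true)
  else if p.2 = ilab ∧ st.2.2 then
    (st.1, st.2.1 ++ [p.1], st.2.2)
  else
    (finA st, [], false)

def tags_to_entities (tokens : List String) (tags : List String) (label : String) : List String :=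
  finA ((tokens.zip tags).foldl (stepA ("B-" ++ label) ("I-" ++ label)) ([], [], false))

-- ===== PORT B =====
-- the inner 'while j < n and tags[j] == i_tag' loop: returns (run tail, final j)
def altRun (tokens tags : List String) (ilab : String) (n j : Nat) : List String × Nat :=
  if h : j < n ∧ tags.getD j "" = ilab then
    let r := altRun tokens tags ilab n (j + 1)
    (tokens.getD j "" :: r.1, r.2)
  else
    ([], j)
termination_by n - j
decreasing_by omega

-- the inner loop only moves j forward (cited by altOuter's termination proof)
theorem altRun_le (tokens tags : List String) (ilab : String) (n j : Nat) :
    j ≤ (altRun tokens tags ilab n j).2 := by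
  unfold altRun
  split
  · have := altRun_le tokens tags ilab n (j + 1)
    simpa using by omega
  · simp
termination_by n - j
decreasing_by omega

-- the outer 'while i < n' loop
def altOuter (tokens tags : List String) (blab ilab : String) (n i : Nat) : List String :=
  if h : i < n then
    if tags.getD i "" = blab then
      let r := altRun tokens tags ilab n (i + 1)
      PySem.Str.join " " (tokens.getD i "" :: r.1) :: altOuter tokens tags blab ilab n r.2
    else
      altOuter tokens tags blab ilab n (i + 1)
  else
    []
termination_by n - i
decreasing_by
  · have := altRun_le tokens tags ilab n (i + 1); omega
  · omega

def tags_to_entities_alt (tokens : List String) (tags : List String) (label : String) : List String :=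
  altOuter tokens tags ("B-" ++ label) ("I-" ++ label) (min tokens.length tags.length) 0

-- ===== PRECONDITION & SPEC =====
def Spec_tags_to_entities (tokens : List String) (tags : List String) (label : String) (out : List String) : Prop := out = tags_to_entities_alt tokens tags label
instance (tokens : List String) (tags : List String) (label : String) (out : List String) : Decidable (Spec_tags_to_entities tokens tags label out) := by unfold Spec_tags_to_entities; infer_instance

-- ===== CLAIM (what is proved, stated in full; the proofs are below) =====
def Claim_equal_tags_to_entities : Prop := ∀ (tokens : List String) (tags : List String) (label : String), Dom_tags_to_entities tokens tags label → Spec_tags_to_entities tokens tags label (tags_to_entities tokens tags label)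

-- ===== LEMMAS AND PROOFS =====

-- zip-level versions of B's two loops, used only to relate the two ports
def consumeZ (ilab : String) : List (String × String) → List String × List (String × String)
  | [] => ([], [])
  | (t, tag) :: rest =>
    if tag = ilab then
      let r := consumeZ ilab rest
      (t :: r.1, r.2)
    else
      ([], (t, tag) :: rest)

theorem consumeZ_len (ilab : String) (l : List (String × String)) :
    (consumeZ ilab l).2.length ≤ l.length := by
  induction l with
  | nil => simp [consumeZ]
  | cons p rest ih =>
    obtain ⟨t, tag⟩ := p
    simp only [consumeZ]
    split
    · simpa using Nat.le_succ_of_le ih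
    · simp

def outerZ (blab ilab : String) : List (String × String) → List String
  | [] => []
  | (t, tag) :: rest =>
    if tag = blab then
      let r := consumeZ ilab rest
      PySem.Str.join " " (t :: r.1) :: outerZ blab ilab r.2
    else
      outerZ blab ilab rest
termination_by l => l.length
decreasing_by
  · have := consumeZ_len ilab rest; simp only [List.length_cons]; omega
  · simp only [List.length_cons]; omega

theorem BI_ne (label : String) : ("B-" ++ label) ≠ ("I-" ++ label) := by
  intro h
  have := congrArg String.toList h
  simp [String.toList_append] at this

theorem finA_nil (e : List String) (b : Bool) : finA (e, [], b) = e := by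
  simp [finA]

theorem finA_ne (e c : List String) (b : Bool) (hc : c ≠ []) :
    finA (e, c, b) = e ++ [PySem.Str.join " " c] := by
  simp [finA, List.isEmpty_iff, hc]

theorem finA_append (e : List String) (st : List String × List String × Bool) :
    finA (e ++ st.1, st.2) = e ++ finA st := by
  obtain ⟨e', c, b⟩ := st
  by_cases hc : c = []
  · simp [hc, finA_nil]
  · simp [finA_ne _ _ _ hc]

-- entities only ever grow by appending; they can be factored out of the fold state
theorem stepA_shift (blab ilab : String) (e c : List String) (b : Bool) (p : String × String) :
    stepA blab ilab (e, c, b) p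
      = (e ++ (stepA blab ilab ([], c, b) p).1, (stepA blab ilab ([], c, b) p).2) := by
  simp only [stepA]
  by_cases hc : c = []
  · subst hc; split_ifs <;> simp [finA_nil]
  · split_ifs <;> simp [finA_ne _ _ _ hc]

theorem foldA_shift (blab ilab : String) (l : List (String × String)) :
    ∀ (e c : List String) (b : Bool),
      l.foldl (stepA blab ilab) (e, c, b)
        = (e ++ (l.foldl (stepA blab ilab) ([], c, b)).1, (l.foldl (stepA blab ilab) ([], c, b)).2) := by
  induction l with
  | nil => intro e c b; simp
  | cons p rest ih =>
    intro e c b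
    simp only [List.foldl_cons]
    rw [stepA_shift]
    rcases hs : stepA blab ilab ([], c, b) p with ⟨s1, s2, s3⟩
    dsimp only
    rw [ih (e ++ s1) s2 s3, ih s1 s2 s3]
    simp

-- the core correspondence between A's state machine and the zip-level B loops
theorem mainA (blab ilab : String) (hBI : blab ≠ ilab) (l : List (String × String)) :
    (∀ c : List String, c ≠ [] →
        finA (l.foldl (stepA blab ilab) ([], c, true))
          = PySem.Str.join " " (c ++ (consumeZ ilab l).1)
              :: outerZ blab ilab (consumeZ ilab l).2)
    ∧ finA (l.foldl (stepA blab ilab) ([], [], false))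
        = outerZ blab ilab l := by
  induction l with
  | nil =>
    refine ⟨fun c hc => ?_, ?_⟩
    · simp [consumeZ, outerZ, finA_ne _ _ _ hc]
    · simp [outerZ, finA_nil]
  | cons p rest ih =>
    obtain ⟨t, tag⟩ := p
    obtain ⟨ih1, ih2⟩ := ih
    constructor
    · intro c hc
      by_cases hb : tag = blab
      · have hni : ¬ tag = ilab := by rw [hb]; exact hBI
        have hstep : stepA blab ilab ([], c, true) (t, tag)
            = ([PySem.Str.join " " c], [t], true) := by
          simp [stepA, hb, finA_ne _ _ _ hc]
        have hcz : consumeZ ilab ((t, tag) :: rest) = ([], (t, tag) :: rest) := by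
          simp [consumeZ, hni]
        have hoz : outerZ blab ilab ((t, tag) :: rest)
            = PySem.Str.join " " (t :: (consumeZ ilab rest).1)
                :: outerZ blab ilab (consumeZ ilab rest).2 := by
          rw [outerZ]; simp [hb]
        rw [List.foldl_cons, hstep, foldA_shift, finA_append, ih1 [t] (by simp),
          hcz, hoz]
        simp
      · by_cases hi : tag = ilab
        · have hstep : stepA blab ilab ([], c, true) (t, tag)
              = ([], c ++ [t], true) := by
            simp [stepA, hi, Ne.symm hBI]
          have hcz : consumeZ ilab ((t, tag) :: rest)
              = (t :: (consumeZ ilab rest).1, (consumeZ ilab rest).2) := by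
            simp [consumeZ, hi]
          rw [List.foldl_cons, hstep, ih1 (c ++ [t]) (by simp), hcz]
          simp
        · have hstep : stepA blab ilab ([], c, true) (t, tag)
              = ([PySem.Str.join " " c], [], false) := by
            simp [stepA, hb, hi, finA_ne _ _ _ hc]
          have hcz : consumeZ ilab ((t, tag) :: rest) = ([], (t, tag) :: rest) := by
            simp [consumeZ, hi]
          have hoz : outerZ blab ilab ((t, tag) :: rest) = outerZ blab ilab rest := by
            rw [outerZ]; simp [hb]
          rw [List.foldl_cons, hstep, foldA_shift, finA_append, ih2, hcz, hoz]
          simp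
    · by_cases hb : tag = blab
      · have hstep : stepA blab ilab ([], [], false) (t, tag)
            = ([], [t], true) := by
          simp [stepA, hb, finA_nil]
        have hoz : outerZ blab ilab ((t, tag) :: rest)
            = PySem.Str.join " " (t :: (consumeZ ilab rest).1)
                :: outerZ blab ilab (consumeZ ilab rest).2 := by
          rw [outerZ]; simp [hb]
        rw [List.foldl_cons, hstep, ih1 [t] (by simp), hoz]
        simp
      · have hstep : stepA blab ilab ([], [], false) (t, tag)
            = ([], [], false) := by
          simp [stepA, hb, finA_nil]
        have hoz : outerZ blab ilab ((t, tag) :: rest) = outerZ blab ilab rest := by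
          rw [outerZ]; simp [hb]
        rw [List.foldl_cons, hstep, ih2, hoz]

-- index-level B equals the zip-level loops on the dropped suffix
theorem zip_drop_cons (tokens tags : List String) (j : Nat)
    (hj : j < min tokens.length tags.length) :
    (tokens.zip tags).drop j
      = (tokens.getD j "", tags.getD j "") :: (tokens.zip tags).drop (j + 1) := by
  have hL : (tokens.zip tags).length = min tokens.length tags.length := List.length_zip
  rw [List.drop_eq_getElem_cons (by omega)]
  congr 1
  rw [List.getElem_zip, List.getD_eq_getElem tokens "" (by omega),
    List.getD_eq_getElem tags "" (by omega)]

theorem bridgeRun (tokens tags : List String) (ilab : String) (j : Nat) :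
    (altRun tokens tags ilab (min tokens.length tags.length) j).1
        = (consumeZ ilab ((tokens.zip tags).drop j)).1
      ∧ (tokens.zip tags).drop (altRun tokens tags ilab (min tokens.length tags.length) j).2
        = (consumeZ ilab ((tokens.zip tags).drop j)).2 := by
  have hL : (tokens.zip tags).length = min tokens.length tags.length := List.length_zip
  rw [altRun]
  split
  · rename_i h
    obtain ⟨hj, htag⟩ := h
    have ih := bridgeRun tokens tags ilab (j + 1)
    rw [zip_drop_cons tokens tags j hj]
    simp only [consumeZ, if_pos htag]
    exact ⟨by simp [ih.1], by simp [ih.2]⟩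
  · rename_i h
    by_cases hj : j < min tokens.length tags.length
    · have htag : ¬ tags.getD j "" = ilab := by tauto
      dsimp only
      rw [zip_drop_cons tokens tags j hj]
      simp only [consumeZ]
      rw [if_neg htag]
      exact ⟨rfl, rfl⟩
    · have hnil : (tokens.zip tags).drop j = [] := by
        rw [List.drop_eq_nil_iff]; omega
      simp [hnil, consumeZ]
termination_by min tokens.length tags.length - j
decreasing_by omega

theorem bridgeOuter (tokens tags : List String) (blab ilab : String) (i : Nat) :
    altOuter tokens tags blab ilab (min tokens.length tags.length) i
      = outerZ blab ilab ((tokens.zip tags).drop i) := by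
  have hL : (tokens.zip tags).length = min tokens.length tags.length := List.length_zip
  rw [altOuter]
  split
  · rename_i hi
    rw [zip_drop_cons tokens tags i hi, outerZ]
    split
    · have hr := bridgeRun tokens tags ilab (i + 1)
      have ih := bridgeOuter tokens tags blab ilab
        (altRun tokens tags ilab (min tokens.length tags.length) (i + 1)).2
      dsimp only
      rw [ih, hr.2, hr.1]
    · exact bridgeOuter tokens tags blab ilab (i + 1)
  · rename_i hi
    have hnil : (tokens.zip tags).drop i = [] := by
      rw [List.drop_eq_nil_iff]; omega
    simp [hnil, outerZ]
termination_by min tokens.length tags.length - i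
decreasing_by
  all_goals have := altRun_le tokens tags ilab (min tokens.length tags.length) (i + 1)
  all_goals omega

-- ===== VERDICT (by name: the statement is the Claim_ definition above) =====
theorem tags_to_entities_spec : Claim_equal_tags_to_entities := by
  intro tokens tags label _
  unfold Spec_tags_to_entities tags_to_entities tags_to_entities_alt
  rw [bridgeOuter, List.drop_zero]
  exact (mainA ("B-" ++ label) ("I-" ++ label) (BI_ne label) (tokens.zip tags)).2
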